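-- pv_equiv track=rewrite | github.com/jaekyungshon/Baekjoon-desktop-backup | 8958two.py | check
-- ===== SOURCE A (Python) =====
-- def check(quiz):
--     stk, score = [], 0
--
--     for i in range(len(quiz)):
--         if i == 0:
--             if quiz[i] == "O":
--                 stk.append(quiz[i])
--                 score += 1
--         elif quiz[i] == "O":
--             stk.append(quiz[i])
--             score += len(stk)
--         else:
--             stk = []
--     return score
-- ===== SOURCE B (Python) =====
-- def check(quiz):
--     total = 0
--     run = 0
--     for c in quiz:
--         if c == "O":
--             run += 1
--         else:
--             total += run * (run + 1) // 2
--             run = 0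
--     return total + run * (run + 1) // 2
-- ===== Notes on version B (the rewrite author's own statement) =====
-- stated objective: simpler
-- what changed: Replaces the index loop with a stack mirroring the streak by a run-length counter that adds the closed-form triangular number L*(L+1)//2 at each run boundary.
import Mathlib
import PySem

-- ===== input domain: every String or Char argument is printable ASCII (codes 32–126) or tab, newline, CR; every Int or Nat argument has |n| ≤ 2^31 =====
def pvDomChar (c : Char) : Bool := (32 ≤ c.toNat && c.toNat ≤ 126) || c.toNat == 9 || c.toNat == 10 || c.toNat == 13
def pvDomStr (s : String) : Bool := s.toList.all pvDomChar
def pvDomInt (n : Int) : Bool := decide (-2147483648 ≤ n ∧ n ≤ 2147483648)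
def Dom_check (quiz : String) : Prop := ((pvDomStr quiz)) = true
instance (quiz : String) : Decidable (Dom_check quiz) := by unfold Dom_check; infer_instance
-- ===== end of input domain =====

-- B replaces A's index loop with a per-character stack by a run-length counter adding the
-- closed-form triangular number at each run boundary (simpler, O(1) extra space).

-- ===== PORT A =====
-- literal port: for i in range(len(quiz)) with state (stk, score); quiz[i] via pyGetD on toList
def check (quiz : String) : Int :=
  let cs := quiz.toList
  let st := (PySem.List.pyRange 0 (cs.length : Int) 1).foldl
    (fun (s : List Char × Int) i =>
      let c := PySem.List.pyGetD cs i ' '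
      if i = 0 then
        if c = 'O' then (s.1 ++ [c], s.2 + 1) else s
      else if c = 'O' then (s.1 ++ [c], s.2 + ((s.1 ++ [c]).length : Int))
      else ([], s.2))
    ([], 0)
  st.2

-- ===== PORT B =====
def check_alt (quiz : String) : Int :=
  let st := quiz.toList.foldl
    (fun (s : Int × Int) c =>
      if c = 'O' then (s.1, s.2 + 1)
      else (s.1 + PySem.Int.floordiv (s.2 * (s.2 + 1)) 2, 0))
    (0, 0)
  st.1 + PySem.Int.floordiv (st.2 * (st.2 + 1)) 2

-- ===== PRECONDITION & SPEC =====
def Spec_check (quiz : String) (out : Int) : Prop := out = check_alt quiz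
instance (quiz : String) (out : Int) : Decidable (Spec_check quiz out) := by unfold Spec_check; infer_instance

-- ===== CLAIM (what is proved, stated in full; the proofs are below) =====
def Claim_equal_check : Prop := ∀ (quiz : String), Dom_check quiz → Spec_check quiz (check quiz)

-- ===== LEMMAS AND PROOFS =====

-- A's loop body once i ≠ 0 (it no longer depends on i)
def gA (s : List Char × Int) (c : Char) : List Char × Int :=
  if c = 'O' then (s.1 ++ [c], s.2 + ((s.1 ++ [c]).length : Int))
  else ([], s.2)

-- B's loop body
def gB (s : Int × Int) (c : Char) : Int × Int :=
  if c = 'O' then (s.1, s.2 + 1)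
  else (s.1 + PySem.Int.floordiv (s.2 * (s.2 + 1)) 2, 0)

def tri (n : Int) : Int := PySem.Int.floordiv (n * (n + 1)) 2

theorem tri_succ (n : Int) : tri (n + 1) = tri n + (n + 1) := by
  obtain ⟨k, hk⟩ := Int.even_mul_succ_self n
  have h1 : n * (n + 1) = 2 * k := by omega
  have h2 : (n + 1) * (n + 1 + 1) = 2 * (k + (n + 1)) := by nlinarith [hk]
  simp only [tri, PySem.Int.floordiv, h1, h2,
    Int.mul_fdiv_cancel_left _ (by norm_num : (2:Int) ≠ 0)]

theorem invariant (rest : List Char) (stk : List Char) (score total : Int)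
    (h : score = total + tri (stk.length : Int)) :
    (rest.foldl gA (stk, score)).2
      = (rest.foldl gB (total, (stk.length : Int))).1
        + tri (rest.foldl gB (total, (stk.length : Int))).2 := by
  induction rest generalizing stk score total with
  | nil => simpa [gA, gB] using h
  | cons c cs ih =>
    by_cases hc : c = 'O'
    · subst hc
      simp only [List.foldl_cons, gA, gB]
      have := ih (stk ++ ['O']) (score + ((stk ++ ['O']).length : Int)) total
        (by simp [h, tri_succ (stk.length : Int)]; ring)
      simpa [List.length_append] using this
    · simp only [List.foldl_cons, gA, gB, if_neg hc]
      have := ih [] score (total + tri (stk.length : Int))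
        (by simp [tri, PySem.Int.floordiv, h])
      simpa [tri] using this

-- A's range fold equals the list fold with gA (first iteration i = 0 coincides with gA on the empty stack)
theorem check_eq_foldl (cs : List Char) :
    ((PySem.List.pyRange 0 (cs.length : Int) 1).foldl
      (fun (s : List Char × Int) i =>
        let c := PySem.List.pyGetD cs i ' '
        if i = 0 then
          if c = 'O' then (s.1 ++ [c], s.2 + 1) else s
        else if c = 'O' then (s.1 ++ [c], s.2 + ((s.1 ++ [c]).length : Int))
        else ([], s.2))
      ([], 0))
    = cs.foldl gA ([], 0) := by
  cases cs with
  | nil => simp [PySem.List.pyRange_one_eq_nil]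
  | cons c rest =>
    rw [PySem.List.pyRange_one_cons (by simp)]
    rw [List.foldl_cons]
    simp only [zero_add]
    have hcongr : ∀ (init : List Char × Int),
        (PySem.List.pyRange 1 ((c :: rest).length : Int) 1).foldl
          (fun (s : List Char × Int) i =>
            let c := PySem.List.pyGetD (c :: rest) i ' '
            if i = 0 then
              if c = 'O' then (s.1 ++ [c], s.2 + 1) else s
            else if c = 'O' then (s.1 ++ [c], s.2 + ((s.1 ++ [c]).length : Int))
            else ([], s.2)) init =
        (PySem.List.pyRange 1 ((c :: rest).length : Int) 1).foldl
          (fun (s : List Char × Int) i => gA s (PySem.List.pyGetD (c :: rest) i ' ')) init := by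
      intro init
      refine PySem.List.foldl_congr_mem _ _ _ _ (fun s i hi => ?_)
      have : (1:Int) ≤ i := ((PySem.List.mem_pyRange_one).1 hi).1
      simp only [gA]
      rw [if_neg (by omega)]
    rw [hcongr, PySem.List.foldl_pyRange_pyGetD' _ _ _ _ (by norm_num : (0:Int) ≤ 1)]
    simp only [List.foldl_cons]
    congr 1
    simp only [PySem.List.pyGetD_zero_cons, gA]
    by_cases hc : c = 'O' <;> simp [hc]

-- ===== VERDICT (by name: the statement is the Claim_ definition above) =====
theorem check_spec : Claim_equal_check := by
  intro quiz _
  unfold Spec_check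
  simp only [check, check_alt]
  rw [check_eq_foldl]
  have hB : quiz.toList.foldl
      (fun (s : Int × Int) c =>
        if c = 'O' then (s.1, s.2 + 1)
        else (s.1 + PySem.Int.floordiv (s.2 * (s.2 + 1)) 2, 0)) (0, 0)
      = quiz.toList.foldl gB (0, 0) := rfl
  rw [hB]
  have := invariant quiz.toList [] 0 0 (by simp [tri, PySem.Int.floordiv])
  simpa [tri] using this
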